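-- pv_equiv track=rewrite | github.com/DanKufra/Introduction-to-Computer-Science | Ex6_Recursion/balanced_brackets.py | match_brackets
-- ===== SOURCE A (Python) =====
-- def is_balanced(s):
--     """This function checks whether a string is balanced (has proper
--     parentheses). It receives a string as an input and returns True if
--     it is balanced, False if it isn't.
--     :param s: Our string
--     :return: True or False
--     """
--     # set our variables to recognize open and closed parentheses
--     opened = "("
--     closed = ")"
--     # set our counter that counts the parentheses
--     open_counter = 0
--     closed_counter = 0
--     # for loop that goes over each character and updates our counter if it
--     # finds a parentheses.
--     for i in s:
--         if i == opened:
--             open_counter += 1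
--         elif i == closed:
--             closed_counter += 1
--         # if clause that checks whether there are more closed than open
--         # and returns false, before going over all of them
--         if closed_counter > open_counter:
--             return False
--     # if clause that checks at the end if there are unmatched parentheses
--     # and returns false
--     if open_counter != closed_counter:
--         return False
--     # if none of the previous cases were found, the function returns True
--     return True
--
-- def match_brackets(s):
--     """Function that checks whether the string is balanced, if it isn't
--     returns an empty list. If it is balanced then for every pair of
--     parentheses returns the difference of their indexes."""
--     # set our variables to recognize open and closed parentheses
--     opened = "("
--     closed = ")"
--     # set the variable of characters that aren't parentheses
--     not_closer = 0
--     # create a list that has 0's the length of the string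
--     result = [not_closer] * len(s)
--     # set our counter variable
--     place_counter = -1
--     # check if string is not balanced. It it isn't, returns an empty list
--     if not is_balanced(s):
--         return []
--
--
--     def seperate(s, p):
--         """
--         Recursive helper function that receives a string and our counter
--         and runs a recursive algorithm that updates our list to include the
--         right numbers based on the indexes it finds. It returns the list
--         :param s: our string
--         :param p: counter for iterations
--         :return: our finished list : result
--         """
--         # our base case when the string is empty, return 0
--         if len(s) == 0:
--             return result
--         # raise our counter by 1, and restart our in function counters
--         p += 1
--         close_count, open_count = 0, 0
--         # for loop the length of our string, that counts open and closed
--         # parentheses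
--         for i in range(len(s)):
--             if s[i] == opened:
--                 open_count += 1
--             elif s[i] == closed:
--                 close_count += 1
--                 # if it finds a closed parentheses before a closed, recall
--                 # the function without the first character
--             if close_count > open_count:
--                 return seperate(s[1:], p)
--             # if we find a pair of matched parentheses, updates our list and
--             #  calls the function without the first character.
--             elif close_count == open_count:
--                 if s[0] == opened:
--                     result[p] = i
--                     result[i+p] = -i
--                 return seperate(s[1:], p)
--     # call and return our helper function seperate().
--     return seperate(s, place_counter)
-- ===== SOURCE B (Python) =====
-- def match_brackets(s):
--     """For a balanced string, return a list where each '(' holds the distance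
--     to its matching ')' and each ')' holds minus that distance; [] if unbalanced.
--     Single O(n) pass with a stack of open-bracket indices."""
--     bal = 0
--     for c in s:
--         if c == '(':
--             bal += 1
--         elif c == ')':
--             bal -= 1
--             if bal < 0:
--                 return []
--     if bal != 0:
--         return []
--     res = [0] * len(s)
--     stack = []
--     for i, c in enumerate(s):
--         if c == '(':
--             stack.append(i)
--         elif c == ')':
--             j = stack.pop()
--             res[j] = i - j
--             res[i] = -(i - j)
--     return res
-- ===== Notes on version B (the rewrite author's own statement) =====
-- stated objective: faster
-- what changed: Replaced the quadratic recursion that rescans every suffix (plus a two-counter balance checker) with a single linear pass that pushes open-bracket indices on a stack and pops on each close to write both distances.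
import Mathlib
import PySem

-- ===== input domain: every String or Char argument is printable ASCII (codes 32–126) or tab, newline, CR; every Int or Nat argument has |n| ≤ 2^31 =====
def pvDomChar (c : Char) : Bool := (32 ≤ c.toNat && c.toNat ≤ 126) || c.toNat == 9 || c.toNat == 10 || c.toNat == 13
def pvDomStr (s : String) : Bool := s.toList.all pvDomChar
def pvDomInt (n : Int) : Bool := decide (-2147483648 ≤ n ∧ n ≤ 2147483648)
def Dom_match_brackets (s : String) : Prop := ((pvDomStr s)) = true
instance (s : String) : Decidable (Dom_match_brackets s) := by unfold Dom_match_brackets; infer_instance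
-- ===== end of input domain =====

-- B replaces A's quadratic suffix-rescanning recursion by one linear stack pass
-- (push open indices, pop on close); objective: faster (asymptotic, O(n^2) → O(n)).

-- ===== PORT A =====
-- is_balanced: two counters, early False as soon as closed > open
def isBalancedAux : List Char → Int → Int → Bool
  | [], o, c => o == c
  | ch :: t, o, c =>
    let o' := if ch = '(' then o + 1 else o
    let c' := if ch ≠ '(' ∧ ch = ')' then c + 1 else c
    if c' > o' then false else isBalancedAux t o' c'

def is_balanced (s : String) : Bool := isBalancedAux s.toList 0 0

-- the inner `for i in range(len(s))` loop of `seperate`: first index i whose check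
-- fires, with which branch (false: close_count > open_count, true: close_count ==
-- open_count); none = the loop falls through (Python's seperate then returns None;
-- that never happens when the string is balanced)
def sepScan : List Char → Int → Int → Option (Nat × Bool)
  | [], _, _ => none
  | ch :: t, oc, cc =>
    let oc' := if ch = '(' then oc + 1 else oc
    let cc' := if ch ≠ '(' ∧ ch = ')' then cc + 1 else cc
    if cc' > oc' then some (0, false)
    else if cc' = oc' then some (0, true)
    else match sepScan t oc' cc' with
         | some (i, b) => some (i + 1, b)
         | none => none

-- the recursive helper seperate(s, p); `result` is Python's closure variable, threaded
def seperate : List Char → Int → List Int → List Int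
  | [], _, result => result
  | ch :: t, p, result =>
    let p' := p + 1
    match sepScan (ch :: t) 0 0 with
    | none => result   -- Python returns None here; unreachable when the string is balanced
    | some (i, b) =>
      if b ∧ ch = '(' then
        seperate t p' (PySem.List.pySetD (PySem.List.pySetD result p' (i : Int)) ((i : Int) + p') (-(i : Int)))
      else seperate t p' result

def match_brackets (s : String) : List Int :=
  let result := List.replicate s.toList.length (0 : Int)
  if !is_balanced s then []
  else seperate s.toList (-1) result

-- ===== PORT B =====
-- single balance counter with early exit (returns none where Source B returns [])
def altBalAux : List Char → Int → Option Int
  | [], bal => some bal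
  | c :: t, bal =>
    if c = '(' then altBalAux t (bal + 1)
    else if c = ')' then
      let bal' := bal - 1
      if bal' < 0 then none else altBalAux t bal'
    else altBalAux t bal

-- one pass: push open indices, pop on ')' and write both distances
def altFill : List Char → Nat → List Nat → List Int → List Int
  | [], _, _, res => res
  | c :: t, i, st, res =>
    if c = '(' then altFill t (i + 1) (i :: st) res
    else if c = ')' then
      match st with
      | j :: st' =>
        altFill t (i + 1) st'
          (PySem.List.pySetD (PySem.List.pySetD res (j : Int) ((i : Int) - (j : Int))) (i : Int) (-((i : Int) - (j : Int))))
      | [] => res   -- Python's stack.pop() would raise here; unreachable: balance already checked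
    else altFill t (i + 1) st res

def match_brackets_alt (s : String) : List Int :=
  match altBalAux s.toList 0 with
  | none => []
  | some bal =>
    if bal ≠ 0 then []
    else altFill s.toList 0 [] (List.replicate s.toList.length (0 : Int))

-- ===== PRECONDITION & SPEC =====
def Spec_match_brackets (s : String) (out : List Int) : Prop := out = match_brackets_alt s
instance (s : String) (out : List Int) : Decidable (Spec_match_brackets s out) := by unfold Spec_match_brackets; infer_instance

-- ===== CLAIM (what is proved, stated in full; the proofs are below) =====
def Claim_equal_match_brackets : Prop := ∀ (s : String), Dom_match_brackets s → Spec_match_brackets s (match_brackets s)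

-- ===== LEMMAS AND PROOFS =====

-- paren weight of a character and prefix sums
def pvW (c : Char) : Int := if c = '(' then 1 else if c = ')' then -1 else 0

def pvS (cs : List Char) (n : Nat) : Int := ((cs.take n).map pvW).sum

def pvBalanced (cs : List Char) : Prop := pvS cs cs.length = 0 ∧ ∀ n, 0 ≤ pvS cs n

-- the matched pairs (open index, close index) produced by a stack pass, in close order
def pairsAux : List Char → Nat → List Nat → List (Nat × Nat)
  | [], _, _ => []
  | c :: t, i, st =>
    if c = '(' then pairsAux t (i + 1) (i :: st)
    else if c = ')' then
      match st with
      | j :: st' => (j, i) :: pairsAux t (i + 1) st'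
      | [] => []   -- matches altFill stopping; unreachable from a balanced top-level call
    else pairsAux t (i + 1) st

def pvPairs (cs : List Char) : List (Nat × Nat) := pairsAux cs 0 []

-- the double write both programs perform for one pair
def pvFset (r : List Int) (p : Nat × Nat) : List Int :=
  (r.set p.1 ((p.2 : Int) - (p.1 : Int))).set p.2 ((p.1 : Int) - (p.2 : Int))

-- the matching close of the open at j, by counting
def pvMate (cs : List Char) (j : Nat) : Option Nat :=
  (List.range' (j + 1) (cs.length - (j + 1))).find? (fun m => pvS cs (m + 1) == pvS cs j)

-- the pairs in open order, as A's recursion discovers them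
def pvPlist (cs : List Char) (k : Nat) : List (Nat × Nat) :=
  (List.range' k (cs.length - k)).filterMap
    (fun j => if cs[j]? = some '(' then (pvMate cs j).map (fun m => (j, m)) else none)

-- semantic characterisation of a matched pair
def pvPairP (cs : List Char) (p : Nat × Nat) : Prop :=
  p.1 < p.2 ∧ p.2 < cs.length ∧ cs[p.1]? = some '(' ∧ cs[p.2]? = some ')' ∧
  pvS cs (p.2 + 1) = pvS cs p.1 ∧ ∀ t, p.1 < t → t ≤ p.2 → pvS cs p.1 < pvS cs t

-- stack invariant of the pass
def pvInv (cs : List Char) (i : Nat) (st : List Nat) : Prop :=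
  pvS cs i = st.length ∧
  ∀ r, (hr : r < st.length) →
    cs[st[r]]? = some '(' ∧ st[r] < i ∧ pvS cs (st[r]) + (r + 1) = pvS cs i ∧
    ∀ t, st[r] < t → t ≤ i → pvS cs i ≤ pvS cs t + r

lemma pvS_succ (cs : List Char) (n : Nat) (h : n < cs.length) :
    pvS cs (n + 1) = pvS cs n + pvW cs[n] := by
  unfold pvS
  rw [List.map_take, List.map_take, List.sum_take_succ (cs.map pvW) n (by simpa using h)]
  simp

-- balance-check agreement: A's two counters vs B's single counter
lemma bal_agree (l : List Char) (o c : Int) (h : c ≤ o) :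
    isBalancedAux l o c = (altBalAux l (o - c)).elim false (fun b => b == 0) := by
  induction l generalizing o c with
  | nil => simp [isBalancedAux, altBalAux]; omega
  | cons ch t ih =>
    by_cases h1 : ch = '('
    · subst h1
      simp only [isBalancedAux, altBalAux, ne_eq, not_true_eq_false, false_and, if_false,
        gt_iff_lt, if_true]
      rw [if_neg (by omega), ih (o + 1) c (by omega)]
      have : o + 1 - c = o - c + 1 := by omega
      rw [this]
    · by_cases h2 : ch = ')'
      · subst h2
        simp only [isBalancedAux, altBalAux, ne_eq, gt_iff_lt,
          show ¬(')' : Char) = '(' from by decide, not_false_iff, true_and, if_false, if_true]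
        by_cases h3 : o < c + 1
        · rw [if_pos h3, if_pos (by omega)]; rfl
        · rw [if_neg h3, if_neg (by omega), ih o (c + 1) (by omega)]
          have : o - c - 1 = o - (c + 1) := by omega
          rw [this]
      · simp only [isBalancedAux, altBalAux, if_neg h1, ne_eq, h2, and_false,
          if_false, gt_iff_lt]
        rw [if_neg (by omega)]
        exact ih o c h

-- B's balance check implies the counting characterisation
lemma altBal_some (l : List Char) (b r : Int) (hb : 0 ≤ b) (h : altBalAux l b = some r) :
    r = b + pvS l l.length ∧ ∀ n, 0 ≤ b + pvS l n := by
  induction l generalizing b with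
  | nil => simp [altBalAux] at h; simp [pvS, ← h, hb]
  | cons ch t ih =>
    have hstep : ∀ n : Nat, pvS (ch :: t) (n + 1) = pvW ch + pvS t n := by
      intro n; simp [pvS, List.take_succ_cons]
    have hz : pvS (ch :: t) 0 = 0 := by simp [pvS]
    by_cases h1 : ch = '('
    · simp only [altBalAux, h1, if_true] at h
      obtain ⟨hr, hall⟩ := ih (b + 1) (by omega) h
      constructor
      · rw [show (ch :: t).length = t.length + 1 by simp, hstep, h1]
        simp [pvW]; omega
      · intro n
        match n with
        | 0 => rw [hz]; omega
        | n + 1 =>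
          rw [hstep, h1]; simp only [pvW, if_true]
          have := hall n; simp; omega
    · by_cases h2 : ch = ')'
      · simp only [altBalAux, h2, if_true] at h
        by_cases h3 : b - 1 < 0
        · rw [if_pos h3] at h; exact absurd h (by simp)
        · rw [if_neg h3] at h
          obtain ⟨hr, hall⟩ := ih (b - 1) (by omega) h
          constructor
          · rw [show (ch :: t).length = t.length + 1 by simp, hstep, h2]
            simp [pvW]; omega
          · intro n
            match n with
            | 0 => rw [hz]; omega
            | n + 1 =>
              rw [hstep, h2]
              have := hall n
              simp only [pvW, show ¬(')' : Char) = '(' from by decide, if_false, if_true]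
              omega
      · simp only [altBalAux, if_neg h1, if_neg h2] at h
        obtain ⟨hr, hall⟩ := ih b hb h
        constructor
        · rw [show (ch :: t).length = t.length + 1 by simp, hstep]
          simp [pvW, h1, h2]; omega
        · intro n
          match n with
          | 0 => rw [hz]; omega
          | n + 1 =>
            rw [hstep]; simp only [pvW, if_neg h1, if_neg h2]
            have := hall n; omega

-- B's fill pass is the fold of pvFset over the pairs
lemma altFill_eq (t : List Char) (i : Nat) (st : List Nat) (res : List Int) :
    altFill t i st res = (pairsAux t i st).foldl pvFset res := by
  induction t generalizing i st res with
  | nil => simp [altFill, pairsAux]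
  | cons c t ih =>
    by_cases h1 : c = '('
    · simp only [altFill, pairsAux, if_pos h1]; exact ih _ _ _
    · by_cases h2 : c = ')'
      · simp only [altFill, pairsAux, if_neg h1, if_pos h2]
        match st with
        | [] => rfl
        | j :: st' =>
          simp only [List.foldl_cons]
          rw [ih]
          congr 1
          simp [pvFset, PySem.List.pySetD_natCast]
      · simp only [altFill, pairsAux, if_neg h1, if_neg h2]; exact ih _ _ _

-- master induction: every emitted pair is semantically matched, and the closes
-- emitted are exactly the ')' positions of the remaining suffix, in order
lemma pairsAux_master (cs : List Char) (hB : pvBalanced cs) :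
    ∀ u i st, cs.drop i = u → pvInv cs i st →
      (∀ p ∈ pairsAux u i st, pvPairP cs p) ∧
      (pairsAux u i st).map Prod.snd
        = (List.range' i u.length).filter (fun t => cs[t]? = some ')') := by
  intro u
  induction u with
  | nil => intro i st _ _; simp [pairsAux]
  | cons c t ih =>
    intro i st hdrop hInv
    obtain ⟨hlen, hst⟩ := hInv
    have hi : i < cs.length := by
      have := congrArg List.length hdrop
      simp [List.length_drop] at this
      omega
    have hci : cs[i]? = some c := by
      have : (cs.drop i)[0]? = cs[i + 0]? := List.getElem?_drop ..
      rw [hdrop] at this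
      simpa using this.symm
    have hcg : cs[i] = c := by
      rw [List.getElem?_eq_getElem hi] at hci
      exact Option.some_injective _ hci
    have hdt : cs.drop (i + 1) = t := by
      have := congrArg List.tail hdrop
      simpa [List.tail_drop] using this
    have hstep : pvS cs (i + 1) = pvS cs i + pvW c := by
      rw [pvS_succ cs i hi, hcg]
    by_cases h1 : c = '('
    · -- push
      have hw : pvW c = 1 := by simp [pvW, h1]
      have hInv' : pvInv cs (i + 1) (i :: st) := by
        refine ⟨by simp [hstep, hw, hlen], ?_⟩
        intro r hr
        match r with
        | 0 =>
          refine ⟨by simpa [h1] using hci, by simp, by simp [hstep, hw], ?_⟩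
          intro t' ht1 ht2
          have : t' = i + 1 := by simp at ht1; omega
          simp [this]
        | r + 1 =>
          simp only [List.getElem_cons_succ]
          obtain ⟨ha, hb, hc', hd⟩ := hst r (by simpa using hr)
          refine ⟨ha, by omega, by rw [hstep, hw]; omega, ?_⟩
          intro t' ht1 ht2
          rcases Nat.lt_or_ge t' (i + 1) with h | h
          · have := hd t' ht1 (by omega)
            rw [hstep, hw]; omega
          · have : t' = i + 1 := by omega
            subst this
            omega
      obtain ⟨hP1, hP2⟩ := ih (i + 1) (i :: st) hdt hInv'
      constructor
      · intro p hp
        simp only [pairsAux, if_pos h1] at hp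
        exact hP1 p hp
      · simp only [pairsAux, if_pos h1, List.length_cons, List.range'_succ, List.filter_cons]
        rw [if_neg (by simp [hci, h1])]
        exact hP2
    · by_cases h2 : c = ')'
      · have hw : pvW c = -1 := by simp [pvW, h2]
        match st with
        | [] =>
          exfalso
          have := hB.2 (i + 1)
          rw [hstep, hw] at this
          simp at hlen
          omega
        | j :: st' =>
          obtain ⟨ha, hb, hc', hd⟩ := hst 0 (by simp)
          simp only [List.getElem_cons_zero] at ha hb hc' hd
          have hpair : pvPairP cs (j, i) := by
            simp only [pvPairP]
            refine ⟨hb, hi, ha, by rwa [h2] at hci, by rw [hstep, hw]; omega, ?_⟩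
            intro t' ht1 ht2
            have := hd t' ht1 ht2
            omega
          have hInv' : pvInv cs (i + 1) st' := by
            refine ⟨by rw [hstep, hw]; simp at hlen ⊢; omega, ?_⟩
            intro r hr
            obtain ⟨ha2, hb2, hc2, hd2⟩ := hst (r + 1) (by simpa using hr)
            simp only [List.getElem_cons_succ] at ha2 hb2 hc2 hd2
            refine ⟨ha2, by omega, by rw [hstep, hw]; omega, ?_⟩
            intro t' ht1 ht2
            rcases Nat.lt_or_ge t' (i + 1) with h | h
            · have := hd2 t' ht1 (by omega)
              rw [hstep, hw]; omega
            · have : t' = i + 1 := by omega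
              subst this
              omega
          obtain ⟨hP1, hP2⟩ := ih (i + 1) st' hdt hInv'
          constructor
          · intro p hp
            simp only [pairsAux, if_neg h1, if_pos h2, List.mem_cons] at hp
            rcases hp with hp | hp
            · rw [hp]; exact hpair
            · exact hP1 p hp
          · simp only [pairsAux, if_neg h1, if_pos h2, List.length_cons, List.range'_succ,
              List.filter_cons, List.map_cons]
            rw [if_pos (by simp [hci, h2])]
            rw [hP2]
      · have hw : pvW c = 0 := by simp [pvW, h1, h2]
        have hInv' : pvInv cs (i + 1) st := by
          refine ⟨by rw [hstep, hw]; omega, ?_⟩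
          intro r hr
          obtain ⟨ha2, hb2, hc2, hd2⟩ := hst r hr
          refine ⟨ha2, by omega, by rw [hstep, hw]; omega, ?_⟩
          intro t' ht1 ht2
          rcases Nat.lt_or_ge t' (i + 1) with h | h
          · have := hd2 t' ht1 (by omega)
            rw [hstep, hw]; omega
          · have : t' = i + 1 := by omega
            subst this
            rw [hstep, hw]; omega
        obtain ⟨hP1, hP2⟩ := ih (i + 1) st hdt hInv'
        constructor
        · intro p hp
          simp only [pairsAux, if_neg h1, if_neg h2] at hp
          exact hP1 p hp
        · simp only [pairsAux, if_neg h1, if_neg h2, List.length_cons, List.range'_succ,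
            List.filter_cons]
          rw [if_neg (by simp [hci, h2])]
          exact hP2

-- find? on range' from a witness with minimality
lemma find?_range'_eq_some (p : Nat → Bool) (a n m : Nat) (h1 : a ≤ m) (h2 : m < a + n)
    (h3 : p m = true) (h4 : ∀ t, a ≤ t → t < m → p t = false) :
    (List.range' a n).find? p = some m := by
  induction n generalizing a with
  | zero => omega
  | succ n ih =>
    rw [List.range'_succ, List.find?_cons]
    by_cases ham : a = m
    · subst ham; rw [h3]
    · rw [h4 a le_rfl (by omega)]
      exact ih (a + 1) (by omega) (by omega) (fun t ht1 ht2 => h4 t (by omega) ht2)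

lemma pair_mate (cs : List Char) (p : Nat × Nat) (hp : pvPairP cs p) :
    pvMate cs p.1 = some p.2 := by
  obtain ⟨h1, h2, _, _, h5, h6⟩ := hp
  unfold pvMate
  apply find?_range'_eq_some _ _ _ _ (by omega) (by omega)
  · simp [h5]
  · intro t ht1 ht2
    have := h6 (t + 1) (by omega) (by omega)
    simp only [beq_eq_false_iff_ne, ne_eq]
    omega

lemma pvInv_zero (cs : List Char) : pvInv cs 0 [] := by
  refine ⟨by simp [pvS], ?_⟩
  intro r hr
  simp at hr

lemma pairs_props (cs : List Char) (hB : pvBalanced cs) :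
    ∀ p ∈ pvPairs cs, pvPairP cs p :=
  (pairsAux_master cs hB cs 0 [] (by simp) (pvInv_zero cs)).1

lemma pairs_snd (cs : List Char) (hB : pvBalanced cs) :
    (pvPairs cs).map Prod.snd
      = (List.range' 0 cs.length).filter (fun t => cs[t]? = some ')') := by
  have := (pairsAux_master cs hB cs 0 [] (by simp) (pvInv_zero cs)).2
  simpa using this

-- number of opens minus number of closes in a window is the prefix-sum difference
lemma count_oc (cs : List Char) :
    ∀ n a, a + n ≤ cs.length →
      (((List.range' a n).filter (fun j => cs[j]? = some '(')).length : Int)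
        - ((List.range' a n).filter (fun j => cs[j]? = some ')')).length
      = pvS cs (a + n) - pvS cs a := by
  intro n
  induction n with
  | zero => intro a _; simp
  | succ n ih =>
    intro a ha
    have haL : a < cs.length := by omega
    have hstep : pvS cs (a + 1) = pvS cs a + pvW cs[a] := pvS_succ cs a haL
    have hrec := ih (a + 1) (by omega)
    rw [List.range'_succ, List.filter_cons, List.filter_cons]
    have hae : cs[a]? = some cs[a] := List.getElem?_eq_getElem haL
    by_cases h1 : cs[a] = '('
    · rw [if_pos (by simp [hae, h1]), if_neg (by simp [hae, h1])]
      simp only [List.length_cons]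
      rw [show a + (n + 1) = (a + 1) + n by omega]
      rw [hstep] at hrec
      simp [pvW, h1] at hrec
      push_cast at hrec ⊢
      omega
    · by_cases h2 : cs[a] = ')'
      · rw [if_neg (by simp [hae, h1]), if_pos (by simp [hae, h2])]
        simp only [List.length_cons]
        rw [show a + (n + 1) = (a + 1) + n by omega]
        rw [hstep] at hrec
        simp [pvW, h2] at hrec
        push_cast at hrec ⊢
        omega
      · rw [if_neg (by simp [hae, h1]), if_neg (by simp [hae, h2])]
        rw [show a + (n + 1) = (a + 1) + n by omega]
        rw [hstep] at hrec
        simp [pvW, h1, h2] at hrec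
        omega

lemma filterMap_len_le {α β : Type} (f : α → Option β) (p : α → Bool) (l : List α)
    (h : ∀ a ∈ l, (f a).isSome → p a = true) :
    (l.filterMap f).length ≤ (l.filter p).length := by
  induction l with
  | nil => simp
  | cons a l ih =>
    have ih' := ih (fun x hx => h x (List.mem_cons_of_mem a hx))
    rw [List.filterMap_cons, List.filter_cons]
    cases hfa : f a with
    | none =>
      split_ifs with hp
      · simpa using Nat.le_succ_of_le ih'
      · simpa using ih'
    | some b =>
      rw [if_pos (h a (List.mem_cons_self) (by simp [hfa]))]
      simpa using ih'

lemma pairs_nodup (cs : List Char) (hB : pvBalanced cs) : (pvPairs cs).Nodup := by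
  apply List.Nodup.of_map Prod.snd
  rw [pairs_snd cs hB]
  exact List.Nodup.filter _ (List.nodup_range' 1)

lemma pairs_length (cs : List Char) (hB : pvBalanced cs) :
    (pvPairs cs).length
      = ((List.range' 0 cs.length).filter (fun j => cs[j]? = some ')')).length := by
  have := congrArg List.length (pairs_snd cs hB)
  simpa using this

lemma opens_closes (cs : List Char) (hB : pvBalanced cs) :
    ((List.range' 0 cs.length).filter (fun j => cs[j]? = some '(')).length
      = ((List.range' 0 cs.length).filter (fun j => cs[j]? = some ')')).length := by
  have := count_oc cs cs.length 0 (by omega)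
  rw [show 0 + cs.length = cs.length by omega] at this
  rw [hB.1] at this
  simp [pvS] at this
  omega

lemma pairs_sub_plist (cs : List Char) (hB : pvBalanced cs) :
    pvPairs cs ⊆ pvPlist cs 0 := by
  intro p hp
  have hP := pairs_props cs hB p hp
  obtain ⟨h1, h2, h3, _, _, _⟩ := hP
  unfold pvPlist
  rw [List.mem_filterMap]
  refine ⟨p.1, ?_, ?_⟩
  · simp [List.mem_range']
    omega
  · rw [if_pos h3, pair_mate cs p (pairs_props cs hB p hp)]
    rfl

lemma pairs_perm_plist (cs : List Char) (hB : pvBalanced cs) :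
    List.Perm (pvPairs cs) (pvPlist cs 0) := by
  apply List.Subperm.perm_of_length_le
    (List.subperm_of_subset (pairs_nodup cs hB) (pairs_sub_plist cs hB))
  calc (pvPlist cs 0).length
      ≤ ((List.range' 0 cs.length).filter (fun j => cs[j]? = some '(')).length := by
        apply filterMap_len_le
        intro a _ ha
        by_cases h : cs[a]? = some '('
        · simp [h]
        · rw [if_neg h] at ha; simp at ha
    _ = ((List.range' 0 cs.length).filter (fun j => cs[j]? = some ')')).length :=
        opens_closes cs hB
    _ = (pvPairs cs).length := (pairs_length cs hB).symm

-- every open position carries a pair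
lemma open_has_pair (cs : List Char) (hB : pvBalanced cs) (j : Nat) (hj : cs[j]? = some '(') :
    ∃ m, (j, m) ∈ pvPairs cs := by
  have hfst_nodup : ((pvPairs cs).map Prod.fst).Nodup := by
    apply List.Nodup.map_on ?_ (pairs_nodup cs hB)
    intro x hx y hy hxy
    have mx := pair_mate cs x (pairs_props cs hB x hx)
    have my := pair_mate cs y (pairs_props cs hB y hy)
    rw [hxy, my] at mx
    exact Prod.ext hxy ((Option.some_injective _ mx).symm)
  have hsub : (pvPairs cs).map Prod.fst ⊆ (List.range' 0 cs.length).filter (fun j => cs[j]? = some '(') := by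
    intro a ha
    rw [List.mem_map] at ha
    obtain ⟨p, hp, rfl⟩ := ha
    obtain ⟨h1, h2, h3, _⟩ := pairs_props cs hB p hp
    rw [List.mem_filter]
    refine ⟨?_, by simp [h3]⟩
    simp [List.mem_range']
    omega
  have hlen : ((List.range' 0 cs.length).filter (fun j => cs[j]? = some '(')).length
      ≤ ((pvPairs cs).map Prod.fst).length := by
    rw [List.length_map, pairs_length cs hB, opens_closes cs hB]
  have hperm := List.Subperm.perm_of_length_le (List.subperm_of_subset hfst_nodup hsub) hlen
  have hjmem : j ∈ (pvPairs cs).map Prod.fst := by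
    rw [hperm.mem_iff, List.mem_filter]
    have hjl : j < cs.length := (List.getElem?_eq_some_iff.mp hj).1
    refine ⟨?_, by simp [hj]⟩
    simp [List.mem_range']
    omega
  rw [List.mem_map] at hjmem
  obtain ⟨p, hp, hpj⟩ := hjmem
  exact ⟨p.2, by rwa [show (j, p.2) = p from Prod.ext hpj.symm rfl]⟩

-- the scan of A finds exactly the matching close
lemma sepScan_spec (u : List Char) (oc cc : Int) (n : Nat) (hn : n < u.length)
    (hzero : oc - cc + ((u.take (n + 1)).map pvW).sum = 0)
    (hpos : ∀ k, k < n → 0 < oc - cc + ((u.take (k + 1)).map pvW).sum) :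
    sepScan u oc cc = some (n, true) := by
  induction u generalizing oc cc n with
  | nil => simp at hn
  | cons c t ih =>
    have hw : ∀ oc' cc', (oc' = if c = '(' then oc + 1 else oc) →
        (cc' = if c ≠ '(' ∧ c = ')' then cc + 1 else cc) → oc' - cc' = oc - cc + pvW c := by
      intro oc' cc' ho hc
      by_cases h1 : c = '('
      · simp [ho, hc, h1, pvW]; omega
      · by_cases h2 : c = ')'
        · simp [ho, hc, h2, pvW]; omega
        · simp [ho, hc, h1, h2, pvW]
    simp only [sepScan]
    set oc' := if c = '(' then oc + 1 else oc with hoc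
    set cc' := if c ≠ '(' ∧ c = ')' then cc + 1 else cc with hcc
    have hd : oc' - cc' = oc - cc + pvW c := hw _ _ hoc hcc
    match n with
    | 0 =>
      have h0 : oc - cc + pvW c = 0 := by simpa [List.take_succ_cons] using hzero
      rw [if_neg (by omega), if_pos (by omega)]
    | n + 1 =>
      have h0 : 0 < oc - cc + pvW c := by simpa [List.take_succ_cons] using hpos 0 (by omega)
      rw [if_neg (by omega), if_neg (by omega)]
      rw [ih oc' cc' n (by simpa using hn)
        (by rw [hd]; simpa [List.take_succ_cons, add_assoc] using hzero)
        (fun k hk => by rw [hd]; simpa [List.take_succ_cons, add_assoc] using hpos (k+1) (by omega))]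

lemma psum_drop (cs : List Char) (k r : Nat) :
    (((cs.drop k).take r).map pvW).sum = pvS cs (k + r) - pvS cs k := by
  unfold pvS
  rw [List.take_add]
  simp

lemma pvMate_of_mem (cs : List Char) (hB : pvBalanced cs) (j m : Nat)
    (hm : (j, m) ∈ pvPairs cs) : pvMate cs j = some m :=
  pair_mate cs (j, m) (pairs_props cs hB (j, m) hm)

-- A's recursion is the fold of pvFset over the pairs in open order
lemma seperate_eq (cs : List Char) (hB : pvBalanced cs) :
    ∀ u k res, cs.drop k = u →
      seperate u ((k : Int) - 1) res = (pvPlist cs k).foldl pvFset res := by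
  intro u
  induction u with
  | nil =>
    intro k res hdrop
    have hlen : cs.length - k = 0 := by
      have := congrArg List.length hdrop
      simpa using this
    simp [seperate, pvPlist, hlen]
  | cons ch t ih =>
    intro k res hdrop
    have hk : k < cs.length := by
      have := congrArg List.length hdrop
      simp [List.length_drop] at this
      omega
    have hck : cs[k]? = some ch := by
      have : (cs.drop k)[0]? = cs[k + 0]? := List.getElem?_drop ..
      rw [hdrop] at this
      simpa using this.symm
    have hdt : cs.drop (k + 1) = t := by
      have := congrArg List.tail hdrop
      simpa [List.tail_drop] using this
    have hcast : ((k + 1 : Nat) : Int) - 1 = (k : Int) - 1 + 1 := by push_cast; ring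
    by_cases h1 : ch = '('
    · obtain ⟨m, hm⟩ := open_has_pair cs hB k (by rwa [h1] at hck)
      have hP := pairs_props cs hB (k, m) hm
      simp only [pvPairP] at hP
      obtain ⟨hp1, hp2, hp3, hp4, hp5, hp6⟩ := hP
      have hscan : sepScan (ch :: t) 0 0 = some (m - k, true) := by
        rw [← hdrop]
        apply sepScan_spec
        · rw [List.length_drop]; omega
        · rw [psum_drop, show k + (m - k + 1) = m + 1 by omega, hp5]
          ring
        · intro kk hkk
          rw [psum_drop, show k + (kk + 1) = k + kk + 1 by omega]
          have := hp6 (k + kk + 1) (by omega) (by omega)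
          omega
      have hplist : pvPlist cs k = (k, m) :: pvPlist cs (k + 1) := by
        unfold pvPlist
        rw [show cs.length - k = (cs.length - (k + 1)) + 1 by omega, List.range'_succ,
          List.filterMap_cons]
        rw [if_pos (by rwa [h1] at hck), pvMate_of_mem cs hB k m hm]
        rfl
      simp only [seperate, hscan]
      rw [if_pos (by simp [h1])]
      have harg : PySem.List.pySetD
            (PySem.List.pySetD res ((k : Int) - 1 + 1) ((m - k : Nat) : Int))
            (((m - k : Nat) : Int) + ((k : Int) - 1 + 1)) (-((m - k : Nat) : Int))
          = pvFset res (k, m) := by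
        have hkm : k ≤ m := le_of_lt hp1
        rw [show (k : Int) - 1 + 1 = ((k : Nat) : Int) by ring,
          show ((m - k : Nat) : Int) + ((k : Nat) : Int) = ((m : Nat) : Int) by omega,
          PySem.List.pySetD_natCast, PySem.List.pySetD_natCast]
        simp only [pvFset]
        congr 1
        · congr 1
          omega
        · omega
      rw [harg, hplist, List.foldl_cons]
      have := ih (k + 1) (pvFset res (k, m)) hdt
      rw [hcast] at this
      exact this
    · have hplist : pvPlist cs k = pvPlist cs (k + 1) := by
        unfold pvPlist
        rw [show cs.length - k = (cs.length - (k + 1)) + 1 by omega, List.range'_succ,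
          List.filterMap_cons]
        rw [if_neg (by rw [hck]; simp [h1])]
      by_cases h2 : ch = ')'
      · have hscan : sepScan (ch :: t) 0 0 = some (0, false) := by
          subst h2
          simp [sepScan]
        simp only [seperate, hscan]
        rw [if_neg (by simp)]
        rw [hplist]
        have := ih (k + 1) res hdt
        rw [hcast] at this
        exact this
      · have hscan : sepScan (ch :: t) 0 0 = some (0, true) := by
          simp [sepScan, h1, h2]
        simp only [seperate, hscan]
        rw [if_neg (by simp [h1])]
        rw [hplist]
        have := ih (k + 1) res hdt
        rw [hcast] at this
        exact this

lemma set4_comm {α : Type} (z : List α) (i1 i2 j1 j2 : Nat) (a b c d : α)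
    (h11 : i1 ≠ j1) (h12 : i1 ≠ j2) (h21 : i2 ≠ j1) (h22 : i2 ≠ j2) :
    (((z.set i1 a).set i2 b).set j1 c).set j2 d
      = (((z.set j1 c).set j2 d).set i1 a).set i2 b := by
  calc (((z.set i1 a).set i2 b).set j1 c).set j2 d
      = (((z.set i1 a).set j1 c).set i2 b).set j2 d := by rw [List.set_comm b c h21]
    _ = (((z.set j1 c).set i1 a).set i2 b).set j2 d := by rw [List.set_comm a c h11]
    _ = (((z.set j1 c).set i1 a).set j2 d).set i2 b := by rw [List.set_comm b d h22]
    _ = (((z.set j1 c).set j2 d).set i1 a).set i2 b := by rw [List.set_comm a d h12]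

lemma pvFset_comm (cs : List Char) (hB : pvBalanced cs) (x y : Nat × Nat)
    (hx : x ∈ pvPairs cs) (hy : y ∈ pvPairs cs) (z : List Int) :
    pvFset (pvFset z x) y = pvFset (pvFset z y) x := by
  by_cases hxy : x = y
  · rw [hxy]
  · have px := pairs_props cs hB x hx
    have py := pairs_props cs hB y hy
    obtain ⟨px1, px2, px3, px4, px5, px6⟩ := px
    obtain ⟨py1, py2, py3, py4, py5, py6⟩ := py
    have h11 : x.1 ≠ y.1 := by
      intro h
      apply hxy
      have mx := pair_mate cs x (pairs_props cs hB x hx)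
      have my := pair_mate cs y (pairs_props cs hB y hy)
      rw [h, my] at mx
      exact Prod.ext h ((Option.some_injective _ mx).symm)
    have h22 : x.2 ≠ y.2 := by
      intro h
      rcases lt_trichotomy x.1 y.1 with hlt | heq | hgt
      · have := px6 y.1 hlt (by omega)
        rw [← py5, ← h, px5] at this
        omega
      · exact h11 heq
      · have := py6 x.1 hgt (by omega)
        rw [← px5, h, py5] at this
        omega
    have h12 : x.1 ≠ y.2 := by
      intro h
      rw [h, py4] at px3
      simp at px3
    have h21 : x.2 ≠ y.1 := by
      intro h
      rw [← h, px4] at py3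
      simp at py3
    simp only [pvFset]
    exact set4_comm z x.1 x.2 y.1 y.2 _ _ _ _ h11 h12 h21 h22

lemma foldl_pairs_eq (cs : List Char) (hB : pvBalanced cs) (res : List Int) :
    (pvPlist cs 0).foldl pvFset res = (pvPairs cs).foldl pvFset res := by
  have hperm := pairs_perm_plist cs hB
  exact (List.Perm.foldl_eq' hperm
    (fun x hx y hy z => pvFset_comm cs hB x y hx hy z) res).symm

-- ===== VERDICT (by name: the statement is the Claim_ definition above) =====
theorem match_brackets_spec : Claim_equal_match_brackets := by
  intro s _
  unfold Spec_match_brackets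
  simp only [match_brackets, match_brackets_alt, is_balanced]
  have hbal := bal_agree s.toList 0 0 le_rfl
  rw [show (0 : Int) - 0 = 0 by ring] at hbal
  cases h : altBalAux s.toList 0 with
  | none =>
    rw [h] at hbal
    simp only [Option.elim] at hbal
    simp only [hbal]
    simp
  | some bal =>
    rw [h] at hbal
    simp only [Option.elim] at hbal
    simp only [hbal]
    by_cases hb : bal = 0
    · subst hb
      simp only [beq_self_eq_true, Bool.not_true, Bool.false_eq_true, if_false, ne_eq,
        not_true_eq_false]
      have hs := altBal_some s.toList 0 0 le_rfl h
      have hB : pvBalanced s.toList := by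
        constructor
        · have := hs.1; omega
        · intro n; have := hs.2 n; omega
      have hsep := seperate_eq s.toList hB s.toList 0
        (List.replicate s.toList.length (0 : Int)) (by simp)
      rw [show ((0 : Nat) : Int) - 1 = (-1 : Int) by ring] at hsep
      rw [hsep, foldl_pairs_eq s.toList hB, altFill_eq]
      rfl
    · simp [hb]
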